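-- pv_equiv track=rewrite | github.com/soluchi07/everknow-animerec | services/etl/clean_anime.py | format_pg_array
-- ===== SOURCE A (Python) =====
-- def format_pg_array(titles_list):
--     if not titles_list:
--         return None
--
--     filtered = []
--     for title in titles_list:
--         if title and title.strip():
--             if cleaned := title.strip().strip(',').strip():
--                 filtered.append(cleaned)
--
--     if not filtered:
--         return None
--
--     escaped = []
--     for title in filtered:
--         title = (title
--                  .replace('\\', '\\\\')
--                  .replace('"', '\\"')
--                  .replace('{', '\\{')
--                  .replace('}', '\\}')
--                 )
--         escaped.append(title)
--
--     return '{' + ','.join(escaped) + '}'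
-- ===== SOURCE B (Python) =====
-- def format_pg_array(titles_list):
--     out = ['{']
--     any_kept = False
--     for title in titles_list:
--         cleaned = title.strip().strip(',').strip()
--         if cleaned:
--             if any_kept:
--                 out.append(',')
--             any_kept = True
--             for c in cleaned:
--                 if c in '\\"{}':
--                     out.append('\\')
--                 out.append(c)
--     if not any_kept:
--         return None
--     out.append('}')
--     return ''.join(out)
-- ===== Notes on version B (the rewrite author's own statement) =====
-- stated objective: alternative
-- what changed: B replaces A's staged pipeline (build a filtered list, build an escaped list, join, wrap) with a single streaming emitter: one pass over the titles writes the final output character by character into one buffer, inserting commas via a first-item flag and prefixing a backslash before each of \ " { } inline instead of four chained .replace scans.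
import Mathlib
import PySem

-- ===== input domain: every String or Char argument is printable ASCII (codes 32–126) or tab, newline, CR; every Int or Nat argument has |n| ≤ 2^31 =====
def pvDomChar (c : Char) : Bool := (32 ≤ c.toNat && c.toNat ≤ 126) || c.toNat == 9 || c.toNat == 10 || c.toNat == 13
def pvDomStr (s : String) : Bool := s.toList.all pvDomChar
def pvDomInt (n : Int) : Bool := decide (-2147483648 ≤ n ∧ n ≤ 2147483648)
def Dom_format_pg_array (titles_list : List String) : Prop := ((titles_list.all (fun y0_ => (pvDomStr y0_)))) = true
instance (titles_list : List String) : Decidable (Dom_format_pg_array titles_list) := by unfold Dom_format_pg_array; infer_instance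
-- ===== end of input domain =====

-- B replaces A's staged pipeline (filtered list, escaped list, join, wrap) with one streaming
-- pass that emits the output character by character, escaping inline; same output.

-- ===== PORT A =====
-- the four chained .replace calls of A
def pgEscA (t : String) : String :=
  PySem.Str.replace (PySem.Str.replace (PySem.Str.replace (PySem.Str.replace t "\\" "\\\\") "\"" "\\\"") "{" "\\{") "}" "\\}"

def format_pg_array (titles_list : List String) : Option String :=
  if titles_list = [] then none
  else
    let filtered := titles_list.foldl (fun acc title =>
      if title ≠ "" ∧ PySem.Str.strip title ≠ "" then
        let cleaned := PySem.Str.strip (PySem.Str.stripChars (PySem.Str.strip title) ",")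
        if cleaned ≠ "" then acc ++ [cleaned] else acc
      else acc) []
    if filtered = [] then none
    else
      let escaped := filtered.foldl (fun acc title => acc ++ [pgEscA title]) []
      some ("{" ++ PySem.Str.join "," escaped ++ "}")

-- ===== PORT B =====
-- B's loop body: clean the title; if it survives, emit a separating ',' (unless first),
-- then its characters with '\' prefixed inline before any of \ " { }
def pgStep (s : List Char × Bool) (title : String) : List Char × Bool :=
  let cleaned := PySem.Str.strip (PySem.Str.stripChars (PySem.Str.strip title) ",")
  if cleaned = "" then s
  else
    let out0 := if s.2 then s.1 ++ [','] else s.1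
    let out1 := cleaned.toList.foldl
      (fun a c => if c ∈ ['\\', '"', '{', '}'] then a ++ ['\\', c] else a ++ [c]) out0
    (out1, true)

def format_pg_array_alt (titles_list : List String) : Option String :=
  let s := titles_list.foldl pgStep (['{'], false)
  if s.2 = false then none
  else some (String.ofList (s.1 ++ ['}']))

-- ===== PRECONDITION & SPEC =====
def Spec_format_pg_array (titles_list : List String) (out : Option String) : Prop := out = format_pg_array_alt titles_list
instance (titles_list : List String) (out : Option String) : Decidable (Spec_format_pg_array titles_list out) := by unfold Spec_format_pg_array; infer_instance

-- ===== CLAIM =====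
def Claim_equal_format_pg_array : Prop := ∀ (titles_list : List String), Dom_format_pg_array titles_list → Spec_format_pg_array titles_list (format_pg_array titles_list)

-- ===== LEMMAS AND PROOFS =====

-- the cleaning step both programs apply to a title
def pgClean (t : String) : String := PySem.Str.strip (PySem.Str.stripChars (PySem.Str.strip t) ",")

-- per-character escape (['\','c'] for the four specials, [c] otherwise)
def pgTable (c : Char) : List Char :=
  if c = '\\' then ['\\', '\\']
  else if c = '"' then ['\\', '"']
  else if c = '{' then ['\\', '{']
  else if c = '}' then ['\\', '}']
  else [c]

theorem go_single (o : Char) (new : List Char) (l acc : List Char) :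
    PySem.Chars.replace.go [o] new l.length l acc
      = acc.reverse ++ l.flatMap (fun c => if c = o then new else [c]) := by
  induction l generalizing acc with
  | nil => simp [PySem.Chars.replace.go]
  | cons c t ih =>
    simp only [List.length_cons, PySem.Chars.replace.go, List.isPrefixOf]
    by_cases h : c = o
    · subst h; simp [ih]
    · simp [h, ih, Ne.symm h]

theorem replace_single (l : List Char) (o : Char) (new : List Char) :
    PySem.Chars.replace l [o] new = l.flatMap (fun c => if c = o then new else [c]) := by
  simp [PySem.Chars.replace, go_single]

theorem chain_eq (l : List Char) :
    ((((l.flatMap (fun c => if c = '\\' then ['\\','\\'] else [c])).flatMap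
        (fun c => if c = '"' then ['\\','"'] else [c])).flatMap
        (fun c => if c = '{' then ['\\','{'] else [c])).flatMap
        (fun c => if c = '}' then ['\\','}'] else [c]))
      = l.flatMap pgTable := by
  induction l with
  | nil => simp
  | cons c t ih =>
    simp only [List.flatMap_cons, List.flatMap_append, ih]
    congr 1
    by_cases h1 : c = '\\' <;> by_cases h2 : c = '"' <;> by_cases h3 : c = '{' <;> by_cases h4 : c = '}' <;>
      simp_all [pgTable]

theorem escA_toList (t : String) : (pgEscA t).toList = t.toList.flatMap pgTable := by
  simp only [pgEscA, PySem.Str.toList_replace]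
  have h1 : ("\\" : String).toList = ['\\'] := by decide
  have h2 : ("\\\\" : String).toList = ['\\','\\'] := by decide
  have h3 : ("\"" : String).toList = ['"'] := by decide
  have h4 : ("\\\"" : String).toList = ['\\','"'] := by decide
  have h5 : ("{" : String).toList = ['{'] := by decide
  have h6 : ("\\{" : String).toList = ['\\','{'] := by decide
  have h7 : ("}" : String).toList = ['}'] := by decide
  have h8 : ("\\}" : String).toList = ['\\','}'] := by decide
  rw [h1,h2,h3,h4,h5,h6,h7,h8, replace_single, replace_single, replace_single, replace_single, chain_eq]

theorem foldl_esc (l acc : List Char) :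
    l.foldl (fun a c => if c = '\\' ∨ c = '"' ∨ c = '{' ∨ c = '}' then a ++ ['\\', c] else a ++ [c]) acc
      = acc ++ l.flatMap pgTable := by
  induction l generalizing acc with
  | nil => simp
  | cons c t ih =>
    simp only [List.foldl_cons, List.flatMap_cons, ih]
    by_cases h1 : c = '\\' <;> by_cases h2 : c = '"' <;> by_cases h3 : c = '{' <;> by_cases h4 : c = '}' <;>
      simp_all [pgTable]

theorem clean_ne_imp (t : String) (h : pgClean t ≠ "") :
    t ≠ "" ∧ PySem.Str.strip t ≠ "" := by
  constructor
  · rintro rfl; exact h (by decide)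
  · intro hs
    apply h
    simp only [pgClean, hs]
    decide

-- A's filtering loop body, rewritten through pgClean with a Bool test
theorem stepA_eq :
    (fun (acc : List String) title =>
      if title ≠ "" ∧ PySem.Str.strip title ≠ "" then
        let cleaned := PySem.Str.strip (PySem.Str.stripChars (PySem.Str.strip title) ",")
        if cleaned ≠ "" then acc ++ [cleaned] else acc
      else acc)
    = (fun acc t => if (pgClean t != "") = true then acc ++ [pgClean t] else acc) := by
  funext acc t
  by_cases h : pgClean t = ""
  · simp only [pgClean] at h
    simp [h, pgClean]
  · obtain ⟨h1, h2⟩ := clean_ne_imp t h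
    simp only [pgClean] at h
    simp [h, h1, h2, pgClean]

-- the list of cleaned surviving titles
def pgFilt (l : List String) : List String := (l.filter (fun t => pgClean t != "")).map pgClean

-- join unfolding on strings
theorem join_singleton (x : String) : PySem.Str.join "," [x] = x := by
  apply String.toList_inj.mp
  simp [PySem.Str.toList_join, PySem.Chars.join_singleton]

theorem join_cons_cons (x y : String) (t : List String) :
    PySem.Str.join "," (x :: y :: t) = x ++ "," ++ PySem.Str.join "," (y :: t) := by
  apply String.toList_inj.mp
  simp [PySem.Str.toList_join, PySem.Chars.join_cons_cons]

-- characters of the comma-join of escaped titles, head ++ tail-with-leading-commas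
theorem join_chars (x : String) (rest : List String) :
    (PySem.Str.join "," ((x :: rest).map pgEscA)).toList
      = (pgEscA x).toList ++ rest.flatMap (fun t => ',' :: (pgEscA t).toList) := by
  induction rest generalizing x with
  | nil => simp [join_singleton]
  | cons y t ih =>
    have hc : ("," : String).toList = [','] := by decide
    simp only [List.map_cons] at ih ⊢
    rw [join_cons_cons, String.toList_append, String.toList_append, hc, ih y]
    simp

-- B's loop once a survivor was already emitted: append ',' + escaped chars per survivor
theorem foldl_step_true (l : List String) (out : List Char) :
    l.foldl pgStep (out, true)
      = (out ++ (pgFilt l).flatMap (fun t => ',' :: (pgEscA t).toList), true) := by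
  induction l generalizing out with
  | nil => simp [pgFilt]
  | cons h t ih =>
    by_cases hc : pgClean h = ""
    · have : pgFilt (h :: t) = pgFilt t := by simp [pgFilt, hc]
      simp only [List.foldl_cons, this]
      rw [show pgStep (out, true) h = (out, true) by
            simp [pgStep, show PySem.Str.strip (PySem.Str.stripChars (PySem.Str.strip h) ",") = pgClean h from rfl, hc]]
      exact ih out
    · have hf : pgFilt (h :: t) = pgClean h :: pgFilt t := by simp [pgFilt, hc]
      simp only [List.foldl_cons, hf]
      rw [show pgStep (out, true) h = (out ++ ',' :: (pgEscA (pgClean h)).toList, true) by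
            simp only [pgStep, show PySem.Str.strip (PySem.Str.stripChars (PySem.Str.strip h) ",") = pgClean h from rfl,
              if_neg hc]
            simp [foldl_esc, escA_toList]]
      rw [ih]
      simp

-- B's loop from the initial state
theorem foldl_step_false (l : List String) (out : List Char) :
    l.foldl pgStep (out, false)
      = if pgFilt l = [] then (out, false)
        else (out ++ (PySem.Str.join "," ((pgFilt l).map pgEscA)).toList, true) := by
  induction l generalizing out with
  | nil => simp [pgFilt]
  | cons h t ih =>
    by_cases hc : pgClean h = ""
    · have hf : pgFilt (h :: t) = pgFilt t := by simp [pgFilt, hc]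
      simp only [List.foldl_cons, hf]
      rw [show pgStep (out, false) h = (out, false) by
            simp [pgStep, show PySem.Str.strip (PySem.Str.stripChars (PySem.Str.strip h) ",") = pgClean h from rfl, hc]]
      exact ih out
    · have hf : pgFilt (h :: t) = pgClean h :: pgFilt t := by simp [pgFilt, hc]
      simp only [List.foldl_cons, hf]
      rw [show pgStep (out, false) h = (out ++ (pgEscA (pgClean h)).toList, true) by
            simp only [pgStep, show PySem.Str.strip (PySem.Str.stripChars (PySem.Str.strip h) ",") = pgClean h from rfl,
              if_neg hc]
            simp [foldl_esc, escA_toList]]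
      rw [foldl_step_true, if_neg (by simp), join_chars]
      simp

-- ===== VERDICT (by name: the statement is the Claim_ definition above) =====
theorem format_pg_array_spec : Claim_equal_format_pg_array := by
  intro l _
  unfold Spec_format_pg_array format_pg_array format_pg_array_alt
  rw [foldl_step_false]
  by_cases hnil : l = []
  · simp [hnil, pgFilt]
  · simp only [if_neg hnil]
    rw [stepA_eq, PySem.List.foldl_append_if, List.nil_append,
        show (l.filter (fun t => pgClean t != "")).map pgClean = pgFilt l from rfl]
    by_cases hF : pgFilt l = []
    · simp [hF]
    · have h1 : ("{" : String).toList = ['{'] := by decide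
      have h2 : ("}" : String).toList = ['}'] := by decide
      have key : "{" ++ PySem.Str.join "," ((pgFilt l).map pgEscA) ++ "}"
          = String.ofList (('{' :: (PySem.Str.join "," ((pgFilt l).map pgEscA)).toList) ++ ['}']) := by
        apply String.toList_inj.mp
        simp [String.toList_append, h1, h2]
      simp only [if_neg hF, PySem.List.foldl_append_singleton_eq_map, List.nil_append,
        Bool.true_eq_false, if_false, key, List.cons_append]
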